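-- pv_equiv track=rewrite | github.com/harsh19/Latent-Anchor-Plan | code/diversity_evals.py | reorder_line
-- ===== SOURCE A (Python) =====
-- def reorder_line(line):
--     words = line.strip().split()
--     if '<eos>' in words:
--         idx = words.index('<eos>')
--     else:
--         idx = len(words)
--     left = [w for w in reversed(words[:idx])]
--     right = words[idx + 1:]
--     return ' '.join(left + right)
-- ===== SOURCE B (Python) =====
-- def reorder_line(line):
--     left, right, found = [], [], False
--     for w in line.strip().split():
--         if found:
--             right.append(w)
--         elif w == '<eos>':
--             found = True
--         else:
--             left.insert(0, w)
--     return ' '.join(left + right)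
-- ===== Notes on version B (the rewrite author's own statement) =====
-- stated objective: alternative
-- what changed: Replaces the membership test + index lookup + two slices + reversal with one forward pass over the words that maintains a found flag and two accumulators, prepending words before the first end-of-sentence marker (so that prefix comes out reversed), skipping that marker once, and appending everything after it.
import Mathlib
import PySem

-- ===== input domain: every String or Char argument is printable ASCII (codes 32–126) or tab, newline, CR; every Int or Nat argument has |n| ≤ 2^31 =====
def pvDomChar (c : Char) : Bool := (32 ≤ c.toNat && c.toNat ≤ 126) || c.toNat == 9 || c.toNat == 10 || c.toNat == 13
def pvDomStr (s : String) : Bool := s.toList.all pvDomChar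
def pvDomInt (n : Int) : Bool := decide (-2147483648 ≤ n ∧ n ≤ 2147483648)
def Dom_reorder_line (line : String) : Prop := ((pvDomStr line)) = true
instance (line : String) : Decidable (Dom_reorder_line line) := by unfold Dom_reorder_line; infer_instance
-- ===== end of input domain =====

-- B reorders the line in a single forward pass with a found-flag and two accumulators
-- instead of A's membership test, index lookup, two slices and a reversal (objective: alternative).

-- ===== PORT A =====
def reorder_line (line : String) : String :=
  let words := PySem.Str.split₀ (PySem.Str.strip line)
  let idx : Nat :=
    if "<eos>" ∈ words then (PySem.List.index? words "<eos>").getD 0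
    else words.length
  let left := (PySem.List.slice words none (some (idx : Int))).reverse
  let right := PySem.List.slice words (some ((idx : Int) + 1)) none
  PySem.Str.join " " (left ++ right)

-- ===== PORT B =====
-- one step of B's loop over the words
def revStep (s : Bool × List String × List String) (w : String) :
    Bool × List String × List String :=
  match s with
  | (found, left, right) =>
    if found then (found, left, right ++ [w])
    else if w = "<eos>" then (true, left, right)
    else (found, w :: left, right)

def reorder_line_alt (line : String) : String :=
  let st := (PySem.Str.split₀ (PySem.Str.strip line)).foldl revStep (false, [], [])
  PySem.Str.join " " (st.2.1 ++ st.2.2)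

-- ===== PRECONDITION & SPEC =====
def Spec_reorder_line (line : String) (out : String) : Prop := out = reorder_line_alt line
instance (line : String) (out : String) : Decidable (Spec_reorder_line line out) := by unfold Spec_reorder_line; infer_instance

-- ===== CLAIM (what is proved, stated in full; the proofs are below) =====
def Claim_equal_reorder_line : Prop := ∀ (line : String), Dom_reorder_line line → Spec_reorder_line line (reorder_line line)

-- ===== LEMMAS AND PROOFS =====

theorem foldl_revStep_true (ws : List String) (l r : List String) :
    ws.foldl revStep (true, l, r) = (true, l, r ++ ws) := by
  induction ws generalizing r with
  | nil => simp
  | cons w ws ih => simp [revStep, ih]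

theorem foldl_revStep_no_eos (ws : List String) (h : "<eos>" ∉ ws) (l r : List String) :
    ws.foldl revStep (false, l, r) = (false, ws.reverse ++ l, r) := by
  induction ws generalizing l with
  | nil => simp
  | cons w ws ih =>
    have hw : w ≠ "<eos>" := fun hc => h (by simp [hc])
    have hws : "<eos>" ∉ ws := fun hc => h (by simp [hc])
    simp [revStep, hw, ih hws]

theorem foldl_revStep_split (pre suf : List String) (h : "<eos>" ∉ pre) :
    (pre ++ "<eos>" :: suf).foldl revStep (false, [], []) =
      (true, pre.reverse, suf) := by
  rw [List.foldl_append, foldl_revStep_no_eos pre h]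
  simp [revStep, foldl_revStep_true]

-- ===== VERDICT (by name: the statement is the Claim_ definition above) =====
theorem reorder_line_spec : Claim_equal_reorder_line := by
  intro line _
  unfold Spec_reorder_line reorder_line reorder_line_alt
  set ws := PySem.Str.split₀ (PySem.Str.strip line) with hws
  by_cases hmem : "<eos>" ∈ ws
  · -- A finds the first "<eos>" at index k
    obtain ⟨k, hk⟩ := (PySem.List.index?_isSome_iff ws "<eos>").2 hmem |> Option.isSome_iff_exists.1
    obtain ⟨pre, suf, hsplit, hlen, hnot⟩ := (PySem.List.index?_eq_some_iff ws "<eos>" k).1 hk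
    simp only [hmem, if_pos, hk, Option.getD_some]
    rw [hsplit, foldl_revStep_split pre suf hnot]
    have h1 : PySem.List.slice (pre ++ "<eos>" :: suf) none (some (k : Int)) = pre := by
      rw [PySem.List.slice_to_natCast, ← hlen, List.take_left]
    have h2 : PySem.List.slice (pre ++ "<eos>" :: suf) (some ((k : Int) + 1)) none = suf := by
      have : ((k : Int) + 1) = ((k + 1 : Nat) : Int) := by push_cast; ring
      rw [this, PySem.List.slice_from_natCast, ← hlen]
      simp [List.drop_append]
    rw [h1, h2]
  · simp only [hmem, if_neg, not_false_iff]
    rw [foldl_revStep_no_eos ws hmem]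
    have h1 : PySem.List.slice ws none (some ((ws.length : Nat) : Int)) = ws := by
      rw [PySem.List.slice_to_natCast]; simp
    have h2 : PySem.List.slice ws (some ((ws.length : Int) + 1)) none = [] := by
      have : ((ws.length : Int) + 1) = ((ws.length + 1 : Nat) : Int) := by push_cast; ring
      rw [this, PySem.List.slice_from_natCast]
      simp
    rw [h1, h2]
    simp
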